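-- pv_equiv track=rewrite | github.com/sagarsanil-sys/python | checkvow.py | revstr
-- ===== SOURCE A (Python) =====
-- def revstr(pla):
-- 	rev=""
-- 	count=0
-- 	for i in pla:
-- 		rev = i + rev
-- 		if i in ('a','e','i','o','u') :
-- 			count+=1
-- 	return rev,count
-- ===== SOURCE B (Python) =====
-- from collections import Counter
--
-- def revstr(pla):
--     counts = Counter(pla)
--     return pla[::-1], sum(counts[v] for v in 'aeiou')
-- ===== Notes on version B (the rewrite author's own statement) =====
-- stated objective: faster
-- what changed: A's single char-by-char loop (quadratic due to per-char string prepend) is replaced by a linear slice reversal pla[::-1] plus a Counter frequency table summed over the five vowels.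
import Mathlib
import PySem

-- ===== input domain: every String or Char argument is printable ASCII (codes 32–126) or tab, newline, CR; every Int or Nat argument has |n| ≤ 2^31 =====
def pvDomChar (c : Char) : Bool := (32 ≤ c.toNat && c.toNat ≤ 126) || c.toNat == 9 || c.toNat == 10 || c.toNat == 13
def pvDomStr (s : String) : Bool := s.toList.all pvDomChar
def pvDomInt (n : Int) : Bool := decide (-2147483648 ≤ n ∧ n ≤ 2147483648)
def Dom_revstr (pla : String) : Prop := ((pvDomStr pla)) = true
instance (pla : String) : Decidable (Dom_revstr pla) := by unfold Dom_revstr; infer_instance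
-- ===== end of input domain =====

-- B replaces A's combined prepend-and-count loop with a slice reversal plus a Counter table summed over the vowels (idiomatic).

-- ===== PORT A =====
-- for i in pla: rev = i + rev; if i in ('a','e','i','o','u'): count += 1
def revstr (pla : String) : String × Int :=
  let st := pla.toList.foldl
    (fun (acc : List Char × Int) i =>
      (i :: acc.1, if i ∈ ['a', 'e', 'i', 'o', 'u'] then acc.2 + 1 else acc.2))
    ([], 0)
  (String.ofList st.1, st.2)

-- ===== PORT B =====
def revstr_alt (pla : String) : String × Int :=
  let counts := PySem.Dict.counter pla.toList
  ((PySem.Str.slice? pla none none (-1)).getD "",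
   (("aeiou".toList).map (fun v => counts.getD v 0)).sum)

-- ===== PRECONDITION & SPEC =====
def Spec_revstr (pla : String) (out : String × Int) : Prop := out = revstr_alt pla
instance (pla : String) (out : String × Int) : Decidable (Spec_revstr pla out) := by unfold Spec_revstr; infer_instance

-- ===== CLAIM (what is proved, stated in full; the proofs are below) =====
def Claim_equal_revstr : Prop := ∀ (pla : String), Dom_revstr pla → Spec_revstr pla (revstr pla)

-- ===== LEMMAS AND PROOFS =====

-- A's loop state after processing l, starting from (r, c).
theorem revstr_foldl (l : List Char) (r : List Char) (c : Int) :
    l.foldl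
      (fun (acc : List Char × Int) i =>
        (i :: acc.1, if i ∈ ['a', 'e', 'i', 'o', 'u'] then acc.2 + 1 else acc.2))
      (r, c)
    = (l.reverse ++ r, c + (l.countP (fun i => i ∈ ['a', 'e', 'i', 'o', 'u']) : Int)) := by
  induction l generalizing r c with
  | nil => simp
  | cons x xs ih =>
      simp only [List.foldl_cons]
      rw [ih]
      by_cases h : x ∈ ['a', 'e', 'i', 'o', 'u'] <;>
        simp only [List.mem_cons, List.not_mem_nil, or_false] at h <;>
        simp [h, List.countP_cons] <;> omega

theorem countP_vowels (l : List Char) :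
    (l.countP (fun i => i ∈ ['a', 'e', 'i', 'o', 'u']))
      = l.count 'a' + l.count 'e' + l.count 'i' + l.count 'o' + l.count 'u' := by
  induction l with
  | nil => simp
  | cons x xs ih =>
      simp only [List.countP_cons, List.count_cons, ih]
      by_cases h : x ∈ ['a', 'e', 'i', 'o', 'u']
      · have h' := h
        simp only [List.mem_cons, List.not_mem_nil, or_false] at h'
        rcases h' with h' | h' | h' | h' | h' <;> subst h' <;> simp <;> omega
      · have h' := h
        simp only [List.mem_cons, List.not_mem_nil, or_false, not_or] at h'
        simp [h, h'.1, h'.2.1, h'.2.2.1, h'.2.2.2.1, h'.2.2.2.2, beq_iff_eq]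

-- ===== VERDICT (by name: the statement is the Claim_ definition above) =====
theorem revstr_spec : Claim_equal_revstr := by
  intro pla _
  unfold Spec_revstr revstr revstr_alt
  have hv : "aeiou".toList = ['a', 'e', 'i', 'o', 'u'] := by decide
  simp only [revstr_foldl, PySem.Str.slice?_none_none_neg_one, Option.getD_some, hv,
    List.map_cons, List.map_nil, PySem.Dict.getD_counter, countP_vowels, List.append_nil,
    List.sum_cons, List.sum_nil]
  refine Prod.ext ?_ ?_
  · rfl
  · push_cast; ring
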